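-- pv_equiv track=rewrite | github.com/MartinSavko/experimental_methods | gxi.py | calculate_gaps
-- ===== SOURCE A (Python) =====
-- def calculate_gaps(det_size, mod_size, gap_size):
--     """
--     Return list of tuples with first and last pixel in each detector gap.
--
--     One list for each detector dimension (x and y).
--     Input: total detector size in pixels
--         size of a module in pixels
--         size of a gap in pixels
--     """
--     ndims = len(det_size)
--     gaps = []
--     for dim_index in range(ndims):
--         gaps.append([])
--         module_start = 0
--         while module_start < det_size[dim_index]:
--             # First pixel on a module has index 0, Python and C style
--             gap_start = module_start + mod_size[dim_index]
--             module_start = gap_start + gap_size[dim_index]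
--             gap_end = module_start - 1
--             if module_start < det_size[dim_index]:
--                 gaps[dim_index].append((gap_start, gap_end))
--             else:
--                 break
--     return gaps
-- ===== SOURCE B (Python) =====
-- def calculate_gaps(det_size, mod_size, gap_size):
--     """
--     Return list of tuples with first and last pixel in each detector gap.
--
--     Closed form: dimension d has (det-1)//(mod+gap) gaps; gap i spans
--     [i*period + mod, (i+1)*period - 1] where period = mod + gap.
--     """
--     result = []
--     for d, size in enumerate(det_size):
--         if size <= 0:
--             result.append([])
--             continue
--         period = mod_size[d] + gap_size[d]
--         n = (size - 1) // period
--         result.append([(i * period + mod_size[d], (i + 1) * period - 1)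
--                        for i in range(n)])
--     return result
-- ===== Notes on version B (the rewrite author's own statement) =====
-- stated objective: simpler
-- what changed: Replaces the stateful while-loop accumulation per dimension with a closed form: the gap count is (det-1)//(mod+gap) and each gap is computed directly from its ordinal in a comprehension; Pre_ excludes inputs where A raises IndexError (module/gap lists shorter than det_size at a dimension with positive size) or loops forever (positive size with mod+gap <= 0).
import Mathlib
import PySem

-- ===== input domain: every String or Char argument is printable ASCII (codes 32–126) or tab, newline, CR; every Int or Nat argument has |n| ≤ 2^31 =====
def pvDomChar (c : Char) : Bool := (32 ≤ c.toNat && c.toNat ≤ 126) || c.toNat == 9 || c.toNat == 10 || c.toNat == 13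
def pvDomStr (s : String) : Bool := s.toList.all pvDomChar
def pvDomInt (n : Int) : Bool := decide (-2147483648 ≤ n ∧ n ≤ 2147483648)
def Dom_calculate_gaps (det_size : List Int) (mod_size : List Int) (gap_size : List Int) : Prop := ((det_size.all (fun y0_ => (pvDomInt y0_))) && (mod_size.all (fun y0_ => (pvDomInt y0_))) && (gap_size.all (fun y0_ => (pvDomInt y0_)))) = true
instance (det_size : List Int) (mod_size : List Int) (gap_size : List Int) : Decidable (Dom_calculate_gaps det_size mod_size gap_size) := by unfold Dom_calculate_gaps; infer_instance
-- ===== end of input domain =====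

-- B replaces A's stateful while-loop per dimension with a closed-form gap count
-- ((det-1)//(mod+gap)) and an index-driven comprehension (objective: simpler).


-- ===== PORT A =====
-- The while loop, with fuel making it total (Pre_ guarantees enough fuel; the
-- fuel is a port artifact, it plays no role on admitted inputs).
def gapsWhile (det m g : Int) : Nat → Int → List (Int × Int) → List (Int × Int)
  | 0, _, acc => acc
  | fuel + 1, module_start, acc =>
    if module_start < det then
      let gap_start := module_start + m
      let module_start' := gap_start + g
      let gap_end := module_start' - 1
      if module_start' < det then
        gapsWhile det m g fuel module_start' (acc ++ [(gap_start, gap_end)])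
      else acc
    else acc

def calculate_gaps (det_size : List Int) (mod_size : List Int) (gap_size : List Int) : List (List (Int × Int)) :=
  (PySem.List.pyRange 0 det_size.length 1).foldl
    (fun gaps dim_index =>
      let det := PySem.List.pyGetD det_size dim_index 0
      let m := PySem.List.pyGetD mod_size dim_index 0
      let g := PySem.List.pyGetD gap_size dim_index 0
      gaps ++ [gapsWhile det m g (det.toNat + 1) 0 []]) []

-- ===== PORT B =====
def altDim (size p m : Int) : List (Int × Int) :=
  let n := PySem.Int.floordiv (size - 1) p
  (PySem.List.pyRange 0 n 1).map (fun i => (i * p + m, (i + 1) * p - 1))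

def calculate_gaps_alt (det_size : List Int) (mod_size : List Int) (gap_size : List Int) : List (List (Int × Int)) :=
  (PySem.List.enumerate det_size).map (fun dsize =>
    if dsize.2 ≤ 0 then []
    else
      let m := PySem.List.pyGetD mod_size dsize.1 0
      let g := PySem.List.pyGetD gap_size dsize.1 0
      altDim dsize.2 (m + g) m)

-- ===== PRECONDITION & SPEC =====
-- Pre_ excludes exactly the inputs where Python A raises IndexError (mod_size or
-- gap_size shorter than det_size at a dimension with positive size) or never
-- terminates (positive size with mod+gap ≤ 0); A returns on no excluded input.
def Pre_calculate_gaps (det_size : List Int) (mod_size : List Int) (gap_size : List Int) : Prop :=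
  ∀ i : Nat, i < det_size.length →
    (det_size.getD i 0 ≤ 0 ∨
      (i < mod_size.length ∧ i < gap_size.length ∧
        0 < mod_size.getD i 0 + gap_size.getD i 0))
instance (det_size : List Int) (mod_size : List Int) (gap_size : List Int) : Decidable (Pre_calculate_gaps det_size mod_size gap_size) := by unfold Pre_calculate_gaps; infer_instance

def pvWitness_calculate_gaps : List Int × List Int × List Int := ([10, 7], [3, 2], [1, 1])

def Spec_calculate_gaps (det_size : List Int) (mod_size : List Int) (gap_size : List Int) (out : List (List (Int × Int))) : Prop := out = calculate_gaps_alt det_size mod_size gap_size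
instance (det_size : List Int) (mod_size : List Int) (gap_size : List Int) (out : List (List (Int × Int))) : Decidable (Spec_calculate_gaps det_size mod_size gap_size out) := by unfold Spec_calculate_gaps; infer_instance

-- ===== CLAIM (what is proved, stated in full; the proofs are below) =====
def Claim_equal_calculate_gaps : Prop := ∀ (det_size : List Int) (mod_size : List Int) (gap_size : List Int), Dom_calculate_gaps det_size mod_size gap_size → Pre_calculate_gaps det_size mod_size gap_size → Spec_calculate_gaps det_size mod_size gap_size (calculate_gaps det_size mod_size gap_size)

-- ===== LEMMAS AND PROOFS =====

def gapFormula (p m j : Int) (N : Nat) : List (Int × Int) :=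
  (List.range N).map (fun (i : Nat) => ((j + (i : Int)) * p + m, (j + (i : Int) + 1) * p - 1))

theorem gapFormula_succ (p m j : Int) (N : Nat) :
    gapFormula p m j (N + 1) = (j * p + m, (j + 1) * p - 1) :: gapFormula p m (j + 1) N := by
  unfold gapFormula
  rw [List.range_succ_eq_map, List.map_cons, List.map_map]
  congr 1
  · simp only [Prod.mk.injEq]; push_cast; constructor <;> ring
  · apply List.map_congr_left
    intro i _
    simp only [Function.comp, Prod.mk.injEq]
    push_cast; constructor <;> ring

theorem gapsWhile_spec (det m g p : Int) (hp : p = m + g) (hp0 : 0 < p) :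
    ∀ (N : Nat) (j : Int) (acc : List (Int × Int)) (fuel : Nat),
      N + 1 ≤ fuel →
      (∀ i : Nat, i < N → (j + i + 1) * p < det) →
      ¬ ((j + N + 1) * p < det) →
      gapsWhile det m g fuel (j * p) acc = acc ++ gapFormula p m j N := by
  intro N
  induction N with
  | zero =>
    intro j acc fuel hfuel _ hstop
    obtain ⟨f, rfl⟩ : ∃ f, fuel = f + 1 := ⟨fuel - 1, by omega⟩
    simp only [gapsWhile]
    have h1 : j * p + m + g = (j + 1) * p := by rw [hp]; ring
    by_cases hlt : j * p < det
    · simp only [if_pos hlt, h1]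
      have : ¬ ((j + 1) * p < det) := by
        intro h; exact hstop (by push_cast; linarith)
      simp [this, gapFormula]
    · simp [hlt, gapFormula]
  | succ N ih =>
    intro j acc fuel hfuel hall hstop
    obtain ⟨f, rfl⟩ : ∃ f, fuel = f + 1 := ⟨fuel - 1, by omega⟩
    have h1 : j * p + m + g = (j + 1) * p := by rw [hp]; ring
    have hnext : (j + 1) * p < det := by
      have := hall 0 (by omega); push_cast at this; linarith
    have houter : j * p < det := by nlinarith
    simp only [gapsWhile, if_pos houter, h1, if_pos hnext]
    rw [ih (j + 1) (acc ++ [(j * p + m, (j + 1) * p - 1)]) f (by omega)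
        (fun i hi => by have := hall (i + 1) (by omega); push_cast at this ⊢; linarith)
        (by intro h; exact hstop (by push_cast at h ⊢; linarith))]
    rw [gapFormula_succ]
    simp

theorem dim_eq (det m g : Int) (hpre : det ≤ 0 ∨ 0 < m + g) :
    gapsWhile det m g (det.toNat + 1) 0 [] =
      (if det ≤ 0 then [] else altDim det (m + g) m) := by
  by_cases hd : det ≤ 0
  · simp only [if_pos hd]
    have : det.toNat = 0 := by omega
    rw [this]
    simp only [gapsWhile]
    simp [show ¬ ((0:Int) < det) by omega]
  · have hp0 : 0 < m + g := hpre.resolve_left hd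
    simp only [if_neg hd, altDim]
    set p := m + g with hp
    have hn0 : 0 ≤ PySem.Int.floordiv (det - 1) p := by
      rw [PySem.Int.le_floordiv_iff_mul_le hp0]; omega
    set n := PySem.Int.floordiv (det - 1) p with hn
    have hnnat : (n.toNat : Int) = n := Int.toNat_of_nonneg hn0
    have hc1 : n * p ≤ det - 1 := (PySem.Int.le_floordiv_iff_mul_le hp0).mp (le_of_eq hn.symm)
    have hc2 : det - 1 < (n + 1) * p := (PySem.Int.floordiv_lt_iff_lt_mul hp0).mp (by omega)
    have hN : n.toNat + 1 ≤ det.toNat + 1 := by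
      have : n ≤ det - 1 := by nlinarith
      omega
    have hspec := gapsWhile_spec det m g p rfl hp0 n.toNat 0 [] (det.toNat + 1) hN
      (fun i hi => by
        have hi' : (i : Int) + 1 ≤ n := by omega
        have hmul : ((i : Int) + 1) * p ≤ n * p :=
          mul_le_mul_of_nonneg_right hi' (le_of_lt hp0)
        nlinarith)
      (by
        intro h
        rw [hnnat] at h
        nlinarith)
    rw [zero_mul] at hspec
    rw [hspec, PySem.List.pyRange_one 0 n]
    simp only [List.nil_append, gapFormula, List.map_map, sub_zero]
    apply List.map_congr_left
    intro i _
    simp only [Function.comp]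

theorem main_fold (mod gap : List Int) : ∀ (det : List Int),
    Pre_calculate_gaps det mod gap →
    List.foldl (fun acc j => acc ++
        [gapsWhile (PySem.List.pyGetD det j 0) (PySem.List.pyGetD mod j 0)
          (PySem.List.pyGetD gap j 0) ((PySem.List.pyGetD det j 0).toNat + 1) 0 []])
      [] (PySem.List.pyRange 0 (det.length : Int) 1) =
    List.map (fun j => if PySem.List.pyGetD det j 0 ≤ 0 then [] else
        altDim (PySem.List.pyGetD det j 0)
          (PySem.List.pyGetD mod j 0 + PySem.List.pyGetD gap j 0)
          (PySem.List.pyGetD mod j 0))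
      (PySem.List.pyRange 0 (det.length : Int) 1) := by
  intro det
  induction det using List.reverseRecOn with
  | nil => intro _; simp [PySem.List.pyRange]
  | append_singleton xs x ih =>
    intro hpre
    have hlen : (((xs ++ [x]).length : Nat) : Int) = (xs.length : Int) + 1 := by
      simp [List.length_append]
    rw [hlen, PySem.List.pyRange_one_succ_right (by positivity)]
    simp only [List.foldl_append, List.map_append, List.foldl_cons, List.foldl_nil,
      List.map_cons, List.map_nil]
    have hget : ∀ j : Int, 0 ≤ j → j < (xs.length : Int) →
        PySem.List.pyGetD (xs ++ [x]) j 0 = PySem.List.pyGetD xs j 0 := by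
      intro j h0 hl
      rw [PySem.List.pyGetD_of_nonneg _ _ h0, PySem.List.pyGetD_of_nonneg _ _ h0]
      rw [List.getD_eq_getElem?_getD, List.getD_eq_getElem?_getD,
        List.getElem?_append_left (by omega)]
    have hpre' : Pre_calculate_gaps xs mod gap := by
      intro i hi
      have := hpre i (by simp [List.length_append]; omega)
      rwa [List.getD_append _ _ _ _ (by omega)] at this
    rw [PySem.List.foldl_congr_mem (PySem.List.pyRange 0 (xs.length : Int) 1) _
      (fun acc j => acc ++
        [gapsWhile (PySem.List.pyGetD xs j 0) (PySem.List.pyGetD mod j 0)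
          (PySem.List.pyGetD gap j 0) ((PySem.List.pyGetD xs j 0).toNat + 1) 0 []]) [] (by
      intro acc j hj
      rw [PySem.List.mem_pyRange_one] at hj
      rw [hget j hj.1 hj.2])]
    rw [ih hpre']
    congr 1
    · apply List.map_congr_left
      intro j hj
      rw [PySem.List.mem_pyRange_one] at hj
      rw [hget j hj.1 hj.2]
    · -- last dimension
      have hgetx : PySem.List.pyGetD (xs ++ [x]) (xs.length : Int) 0 = x := by
        rw [PySem.List.pyGetD_of_nonneg _ _ (by positivity)]
        simp
      simp only [hgetx]
      have hprex := hpre xs.length (by simp [List.length_append])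
      have hx : (xs ++ [x]).getD xs.length 0 = x := by
        simp [List.getD_eq_getElem?_getD]
      rw [hx] at hprex
      rw [dim_eq x (PySem.List.pyGetD mod (xs.length : Int) 0)
        (PySem.List.pyGetD gap (xs.length : Int) 0) ?_]
      · rcases hprex with h | ⟨h1, h2, h3⟩
        · left; exact h
        · right
          rw [PySem.List.pyGetD_of_nonneg _ _ (by positivity),
            PySem.List.pyGetD_of_nonneg _ _ (by positivity)]
          simpa [Int.toNat_natCast] using h3

-- ===== VERDICT (by name: the statement is the Claim_ definition above) =====
theorem calculate_gaps_spec : Claim_equal_calculate_gaps := by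
  intro det mod gap hdom hpre
  clear hdom
  unfold Spec_calculate_gaps calculate_gaps calculate_gaps_alt
  rw [PySem.List.enumerate_eq_map_pyRange det (0 : Int), PySem.List.len_eq det,
    List.map_map]
  exact main_fold mod gap det hpre
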